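-- pv_equiv track=rewrite | github.com/img-api/img-api | api/galleries/models.py | get_safe_gallery_name
-- ===== SOURCE A (Python) =====
-- def get_safe_gallery_name(possible_name):
--     """ Converts a title into a string that we can use for our database name, by removing all the extra characters
--         [TODO] Check unicode values
--     """
--     possible_name = possible_name.strip().lower()
--     prev = '_'
--
--     clean = []
--
--     for c in possible_name:
--         s = ("" + c)
--         if s.isalpha() or s.isalnum():
--             clean.append(c)
--             prev = c
--             continue
--
--         if prev == '_':
--             continue
--
--         prev = '_'
--         clean.append(prev)
--
--     if clean[-1] == '_':
--         clean.pop()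
--
--     # The name has to be less than 24, so we don't hit an ID
--     final = "".join(clean)[:23]
--     return final
-- ===== SOURCE B (Python) =====
-- def get_safe_gallery_name(possible_name):
--     """ Converts a title into a string that we can use for our database name, by removing all the extra characters
--         [TODO] Check unicode values
--     """
--     s = possible_name.strip().lower()
--     words = "".join(c if c.isalnum() else " " for c in s).split()
--     return "_".join(words)[:23]
-- ===== Notes on version B (the rewrite author's own statement) =====
-- stated objective: simpler
-- what changed: Replaces the stateful character loop tracking a 'previous' sentinel plus the trailing-underscore pop with a declarative pipeline: map non-alphanumerics to spaces, str.split() to get the maximal alphanumeric runs (which drops leading/trailing/repeated separators for free), and '_'.join them.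
import Mathlib
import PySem

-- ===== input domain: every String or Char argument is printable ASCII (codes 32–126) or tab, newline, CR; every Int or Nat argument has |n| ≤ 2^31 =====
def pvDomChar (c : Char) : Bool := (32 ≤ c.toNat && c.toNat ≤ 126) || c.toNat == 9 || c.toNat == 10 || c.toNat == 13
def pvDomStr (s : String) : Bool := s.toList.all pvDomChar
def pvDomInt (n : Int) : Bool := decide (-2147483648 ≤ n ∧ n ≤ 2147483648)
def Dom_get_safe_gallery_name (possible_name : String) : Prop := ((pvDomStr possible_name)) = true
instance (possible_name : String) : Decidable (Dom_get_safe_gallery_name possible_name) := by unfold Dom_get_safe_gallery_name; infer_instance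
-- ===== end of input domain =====

-- B replaces A's stateful character loop (prev-sentinel + trailing-underscore pop) by
-- map-to-spaces / split() / '_'.join(); same return value wherever A returns (Pre_).

-- ===== PORT A =====
-- A-side helper: the tail `if clean[-1] == '_': clean.pop()`; the `none` branch of
-- clean[-1] is where Python raises IndexError (clean empty) — excluded by Pre_.
def pvATail (xs : List Char) : List Char :=
  match PySem.List.pyGet? xs (-1) with
  | some c =>
      if c = '_' then
        match PySem.List.pop? xs with
        | some p => p.2
        | none => xs
      else xs
  | none => xs

-- A-side helper: one iteration of A's for-loop over (clean, prev).
def pvAStep (acc : List Char × Char) (c : Char) : List Char × Char :=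
  if PySem.Chars.isalpha c || PySem.Chars.isalnum c then (acc.1 ++ [c], c)
  else if acc.2 = '_' then acc
  else (acc.1 ++ ['_'], '_')

def get_safe_gallery_name (possible_name : String) : String :=
  let s := PySem.Chars.lower (PySem.Chars.strip possible_name.toList)
  let st := s.foldl pvAStep ([], '_')
  let clean := pvATail st.1
  String.ofList (PySem.List.slice clean none (some 23))

-- ===== PORT B =====
def get_safe_gallery_name_alt (possible_name : String) : String :=
  let s := PySem.Chars.lower (PySem.Chars.strip possible_name.toList)
  let spaced := s.map (fun c => if PySem.Chars.isalnum c then c else ' ')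
  let words := PySem.Chars.split₀ spaced
  String.ofList (PySem.List.slice (PySem.Chars.join ['_'] words) none (some 23))

-- ===== PRECONDITION & SPEC =====
-- Pre_ excludes exactly the inputs with no alphanumeric character, on which Python A raises IndexError.
def Pre_get_safe_gallery_name (possible_name : String) : Prop :=
  possible_name.toList.any PySem.Chars.isalnum = true
instance (possible_name : String) : Decidable (Pre_get_safe_gallery_name possible_name) := by
  unfold Pre_get_safe_gallery_name; infer_instance
def pvWitness_get_safe_gallery_name : String := "a b"

def Spec_get_safe_gallery_name (possible_name : String) (out : String) : Prop :=
  out = get_safe_gallery_name_alt possible_name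
instance (possible_name : String) (out : String) : Decidable (Spec_get_safe_gallery_name possible_name out) := by
  unfold Spec_get_safe_gallery_name; infer_instance

-- ===== CLAIM (what is proved, stated in full; the proofs are below) =====
def Claim_equal_get_safe_gallery_name : Prop := ∀ (possible_name : String), Dom_get_safe_gallery_name possible_name → Pre_get_safe_gallery_name possible_name → Spec_get_safe_gallery_name possible_name (get_safe_gallery_name possible_name)
-- ===== LEMMAS AND PROOFS =====

-- A's collapsed run of characters, parameterised by "previous was a separator / start".
def pvCollapse : List Char → Bool → List Char
  | [], _ => []
  | c :: t, sep =>
      if PySem.Chars.isalnum c then c :: pvCollapse t false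
      else if sep then pvCollapse t true
      else '_' :: pvCollapse t true

-- drop one trailing '_' (what A's tail does on nonempty clean, and the identity on []).
def pvTrim (xs : List Char) : List Char :=
  if xs.getLast? = some '_' then xs.dropLast else xs

lemma pvAlnum_ne_underscore {c : Char} (h : PySem.Chars.isalnum c = true) : c ≠ '_' := by
  rintro rfl; exact absurd h (by decide)

lemma pvAlnum_not_space {c : Char} (h : PySem.Chars.isalnum c = true) :
    PySem.Chars.isspace c = false := by
  simp only [PySem.Chars.isalnum, PySem.Chars.isalpha, PySem.Chars.isupper, PySem.Chars.islower,
    PySem.Chars.isdigit, Bool.or_eq_true, Bool.and_eq_true, decide_eq_true_eq, Char.le_def,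
    UInt32.le_iff_toNat_le] at h
  have hv : c.val.toNat = c.toNat := rfl
  rw [hv] at h
  simp only [show 'A'.val.toNat = 65 from rfl, show 'Z'.val.toNat = 90 from rfl,
    show 'a'.val.toNat = 97 from rfl, show 'z'.val.toNat = 122 from rfl,
    show '0'.val.toNat = 48 from rfl, show '9'.val.toNat = 57 from rfl] at h
  simp only [PySem.Chars.isspace]
  simp only [Bool.or_eq_false_iff, Bool.and_eq_false_iff, decide_eq_false_iff_not]
  omega

lemma pvTrim_cons (c : Char) (xs : List Char) (h : xs = [] → c ≠ '_') :
    pvTrim (c :: xs) = c :: pvTrim xs := by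
  cases xs with
  | nil => simp [pvTrim, h rfl]
  | cons x t => simp [pvTrim]; split_ifs <;> simp

-- A's loop computes pvCollapse (first component of the state).
lemma pvLoopA (l : List Char) (clean : List Char) (prev : Char) :
    (l.foldl pvAStep (clean, prev)).1 = clean ++ pvCollapse l (decide (prev = '_')) := by
  induction l generalizing clean prev with
  | nil => simp [pvCollapse]
  | cons c t ih =>
      rw [List.foldl_cons]
      by_cases ha : PySem.Chars.isalnum c = true
      · have hstep : pvAStep (clean, prev) c = (clean ++ [c], c) := by simp [pvAStep, ha]
        rw [hstep, ih]
        have hcu : (decide (c = '_')) = false := by simp [pvAlnum_ne_underscore ha]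
        simp [pvCollapse, ha, hcu]
      · have ha' : PySem.Chars.isalnum c = false := by simpa using ha
        have hal : PySem.Chars.isalpha c = false := by
          have h2 := ha'
          simp only [PySem.Chars.isalnum, Bool.or_eq_false_iff] at h2
          exact h2.1
        by_cases hp : prev = '_'
        · have hstep : pvAStep (clean, prev) c = (clean, prev) := by
            simp [pvAStep, ha', hal, hp]
          rw [hstep, ih]
          simp [pvCollapse, ha', hp]
        · have hstep : pvAStep (clean, prev) c = (clean ++ ['_'], '_') := by
            simp [pvAStep, ha', hal, hp]
          rw [hstep, ih]
          simp [pvCollapse, ha', hp]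

-- A's tail is pvTrim.
lemma pvTailA (xs : List Char) : pvATail xs = pvTrim xs := by
  induction xs using List.reverseRecOn with
  | nil => simp [pvATail, PySem.List.pyGet?, PySem.List.pyIdx?, pvTrim]
  | append_singleton ys a ih =>
      have h1 : PySem.List.pyGet? (ys ++ [a]) (-1) = some a := by simp [pysem]
      have h2 : PySem.List.pop? (ys ++ [a]) = some (a, ys) := by simp [pysem]
      unfold pvATail
      rw [h1, h2]
      by_cases hA : a = '_' <;> simp [hA, pvTrim]

lemma pvGoAcc (s cur : List Char) (acc : List (List Char)) :
    PySem.Chars.split₀.go s cur acc = acc.reverse ++ PySem.Chars.split₀.go s cur [] := by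
  induction s generalizing cur acc with
  | nil => simp only [PySem.Chars.split₀.go]; split_ifs <;> simp
  | cons c t ih =>
      simp only [PySem.Chars.split₀.go]
      split_ifs with h1 h2
      · exact ih _ _
      · rw [ih _ (cur.reverse :: acc), ih _ [cur.reverse]]; simp
      · exact ih _ _

-- a nonempty current word ⇒ split₀.go never returns an empty word list
lemma pvGoNe (s cur : List Char) (h : cur ≠ []) :
    PySem.Chars.split₀.go s cur [] ≠ [] := by
  induction s generalizing cur with
  | nil => simp [PySem.Chars.split₀.go, h]
  | cons c t ih =>
      simp only [PySem.Chars.split₀.go]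
      split_ifs with h1 h2
      · exact absurd h2 (by simpa using h)
      · rw [pvGoAcc]; simp
      · exact ih _ (by simp)

lemma pvCollapse_nil_iff (l : List Char) :
    pvCollapse l true = [] ↔ ∀ c ∈ l, PySem.Chars.isalnum c = false := by
  induction l with
  | nil => simp [pvCollapse]
  | cons c t ih =>
      by_cases h : PySem.Chars.isalnum c = true
      · simp [pvCollapse, h]
      · simp only [Bool.not_eq_true] at h
        simp [pvCollapse, h, ih]

lemma pvGo_nil_iff (l : List Char) :
    PySem.Chars.split₀.go (l.map (fun c => if PySem.Chars.isalnum c then c else ' ')) [] [] = []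
      ↔ ∀ c ∈ l, PySem.Chars.isalnum c = false := by
  induction l with
  | nil => simp [PySem.Chars.split₀.go]
  | cons c t ih =>
      by_cases h : PySem.Chars.isalnum c = true
      · simp only [List.map_cons, h, if_true, PySem.Chars.split₀.go, pvAlnum_not_space h,
          Bool.false_eq_true, if_false]
        simp [pvGoNe _ [c] (by simp), h]
      · simp only [Bool.not_eq_true] at h
        simp only [List.map_cons, h, Bool.false_eq_true, if_false, PySem.Chars.split₀.go]
        have hsp : PySem.Chars.isspace ' ' = true := by decide
        simp [hsp, h, ih]

-- main invariant: sep mode (no pending word) and in-word mode (pending reversed word cur)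
lemma pvMain (l : List Char) :
    (PySem.Chars.join ['_'] (PySem.Chars.split₀.go
        (l.map (fun c => if PySem.Chars.isalnum c then c else ' ')) [] [])
      = pvTrim (pvCollapse l true))
    ∧ (∀ cur, cur ≠ [] →
        PySem.Chars.join ['_'] (PySem.Chars.split₀.go
          (l.map (fun c => if PySem.Chars.isalnum c then c else ' ')) cur [])
        = cur.reverse ++ pvTrim (pvCollapse l false)) := by
  induction l with
  | nil =>
      constructor
      · simp [PySem.Chars.split₀.go, pvCollapse, pvTrim, PySem.Chars.join_nil]
      · intro cur h
        simp [PySem.Chars.split₀.go, pvCollapse, pvTrim, PySem.Chars.join_singleton, h]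
  | cons c t ih =>
      obtain ⟨ih1, ih2⟩ := ih
      by_cases h : PySem.Chars.isalnum c = true
      · have hs := pvAlnum_not_space h
        have hne := pvAlnum_ne_underscore h
        constructor
        · simp only [List.map_cons, h, if_true, PySem.Chars.split₀.go, hs, Bool.false_eq_true,
            if_false]
          rw [ih2 [c] (by simp), pvCollapse, if_pos h, pvTrim_cons c _ (fun _ => hne)]
          simp
        · intro cur hcur
          simp only [List.map_cons, h, if_true, PySem.Chars.split₀.go, hs, Bool.false_eq_true,
            if_false]
          rw [ih2 (c :: cur) (by simp), pvCollapse, if_pos h, pvTrim_cons c _ (fun _ => hne)]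
          simp
      · simp only [Bool.not_eq_true] at h
        have hsp : PySem.Chars.isspace ' ' = true := by decide
        constructor
        · simp only [List.map_cons, h, Bool.false_eq_true, if_false, PySem.Chars.split₀.go]
          simp [hsp, pvCollapse, h, ih1]
        · intro cur hcur
          have hni : cur.isEmpty = false := by simp [hcur]
          simp only [List.map_cons, h, Bool.false_eq_true, if_false, PySem.Chars.split₀.go, hsp,
            if_true, hni]
          rw [pvGoAcc]
          by_cases hz : PySem.Chars.split₀.go
              (t.map (fun c => if PySem.Chars.isalnum c then c else ' ')) [] [] = []
          · have hcz : pvCollapse t true = [] :=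
              (pvCollapse_nil_iff t).mpr ((pvGo_nil_iff t).mp hz)
            rw [hz]
            simp [hcz, pvCollapse, h, pvTrim, PySem.Chars.join_singleton]
          · have hcz : pvCollapse t true ≠ [] := fun e =>
              hz ((pvGo_nil_iff t).mpr ((pvCollapse_nil_iff t).mp e))
            obtain ⟨w, ws', hw⟩ := List.exists_cons_of_ne_nil hz
            have hJ : PySem.Chars.join ['_'] (w :: ws') = pvTrim (pvCollapse t true) :=
              hw ▸ ih1
            rw [hw]
            have hrev : List.reverse [cur.reverse] = [cur.reverse] := by simp
            rw [hrev, List.singleton_append, PySem.Chars.join_cons_cons, hJ]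
            simp only [pvCollapse, h, Bool.false_eq_true, if_false]
            rw [pvTrim_cons '_' _ (fun e => absurd e hcz)]
            simp

-- ===== VERDICT (by name: the statement is the Claim_ definition above) =====
theorem get_safe_gallery_name_spec : Claim_equal_get_safe_gallery_name := by
  intro s _ _
  unfold Spec_get_safe_gallery_name
  simp only [get_safe_gallery_name, get_safe_gallery_name_alt, PySem.Chars.split₀]
  rw [pvLoopA]
  simp only [List.nil_append, decide_true]
  rw [pvTailA, (pvMain (PySem.Chars.lower (PySem.Chars.strip s.toList))).1]
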